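-- pv_equiv track=rewrite | github.com/benhaub/AbstractionLayer | Utilities/CheckStaticStringSizes.py | decoded_string_literal_length
-- ===== SOURCE A (Python) =====
-- def decoded_string_literal_length(content: str) -> int:
--     """Return the length in bytes of a C++ string literal content (between the quotes)."""
--     length = 0
--     i = 0
--     while i < len(content):
--         if content[i] == "\\" and i + 1 < len(content):
--             nxt = content[i + 1]
--             if nxt in "\\\"'?nrt0":
--                 length += 1
--                 i += 2
--                 continue
--             if nxt == "x" and i + 3 < len(content):
--                 length += 1
--                 i += 4
--                 continue
--             if nxt in "01234567":
--                 length += 1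
--                 j = i + 2
--                 while j < len(content) and j - (i + 1) < 3 and content[j] in "01234567":
--                     j += 1
--                 i = j
--                 continue
--         length += 1
--         i += 1
--     return length
-- ===== SOURCE B (Python) =====
-- import re
--
-- # Each match of this pattern is exactly one decoded byte: simple escape,
-- # \x consuming two following chars, octal escape of 1-3 digits, or any single char.
-- _TOKEN = re.compile(r'\\[\\"\'?nrt0]|\\x..|\\[1-7][0-7]{0,2}|.', re.DOTALL)
--
-- def decoded_string_literal_length(content: str) -> int:
--     """Return the length in bytes of a C++ string literal content (between the quotes)."""
--     return len(_TOKEN.findall(content))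
-- ===== Notes on version B (the rewrite author's own statement) =====
-- stated objective: idiomatic
-- what changed: Replaced the hand-written index-walking while loop (with its nested octal-digit inner loop) by a single compiled regex that tokenizes the content into decoded-byte units and returns len(re.findall(...)); the alternatives mirror the escape kinds in priority order.
import Mathlib
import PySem

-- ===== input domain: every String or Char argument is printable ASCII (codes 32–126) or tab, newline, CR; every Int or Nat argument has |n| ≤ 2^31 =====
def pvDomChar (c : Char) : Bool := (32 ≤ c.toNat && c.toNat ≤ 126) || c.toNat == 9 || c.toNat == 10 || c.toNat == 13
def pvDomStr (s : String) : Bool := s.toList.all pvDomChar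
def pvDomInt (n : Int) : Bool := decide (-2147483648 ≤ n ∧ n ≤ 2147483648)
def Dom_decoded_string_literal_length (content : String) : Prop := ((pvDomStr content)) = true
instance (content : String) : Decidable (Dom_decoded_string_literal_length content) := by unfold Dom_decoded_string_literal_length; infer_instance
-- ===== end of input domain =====

-- B is more idiomatic: one regex tokenizing the content into decoded-byte units; the answer is the number of matches.

-- ===== PORT A =====
-- the char classes A tests membership in ("\\\"'?nrt0" and "01234567")
def pvSimpleChars : List Char := ['\\', '"', '\'', '?', 'n', 'r', 't', '0']
def pvOctChars : List Char := ['0', '1', '2', '3', '4', '5', '6', '7']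

-- A's inner while loop advancing j over up to two further octal digits
def pvA_inner (cs : List Char) (p : Nat) (j : Nat) : Nat :=
  if h : j < cs.length then
    if j - p < 3 ∧ pvOctChars.contains (cs[j]'h) then
      pvA_inner cs p (j + 1)
    else j
  else j
termination_by cs.length - j
decreasing_by omega

theorem pvA_inner_ge (cs : List Char) (p j : Nat) : j ≤ pvA_inner cs p j := by
  unfold pvA_inner
  split
  · split
    · have := pvA_inner_ge cs p (j + 1); omega
    · exact Nat.le_refl j
  · exact Nat.le_refl j
termination_by cs.length - j
decreasing_by rename_i h _; omega

-- A's main while loop, index i and accumulator `length`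
def pvA_loop (cs : List Char) (i : Nat) (acc : Int) : Int :=
  if h : i < cs.length then
    if h2 : cs[i]'h = '\\' ∧ i + 1 < cs.length then
      let nxt := cs[i+1]'h2.2
      if pvSimpleChars.contains nxt then pvA_loop cs (i + 2) (acc + 1)
      else if nxt = 'x' ∧ i + 3 < cs.length then pvA_loop cs (i + 4) (acc + 1)
      else if pvOctChars.contains nxt then pvA_loop cs (pvA_inner cs (i + 1) (i + 2)) (acc + 1)
      else pvA_loop cs (i + 1) (acc + 1)
    else pvA_loop cs (i + 1) (acc + 1)
  else acc
termination_by cs.length - i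
decreasing_by
  · omega
  · omega
  · have := pvA_inner_ge cs (i + 1) (i + 2); omega
  · omega
  · omega

def decoded_string_literal_length (content : String) : Int :=
  pvA_loop content.toList 0 0

-- ===== PORT B =====
-- hand port of re.findall with pattern \\[\\"'?nrt0]|\\x..|\\[1-7][0-7]{0,2}|. under DOTALL:
-- the leftmost non-overlapping scan tries the four alternatives in order at each position;
-- we count the matches while consuming each match's characters.
def pvIsSimple (c : Char) : Bool := pvSimpleChars.contains c   -- class [\\"'?nrt0]
def pvIsOct (c : Char) : Bool := pvOctChars.contains c         -- class [0-7]
def pvIsOctStart (c : Char) : Bool :=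
  ['1', '2', '3', '4', '5', '6', '7'].contains c               -- class [1-7]

-- greedy [0-7]{0,2}: drop up to two leading octal digits
def pvDropOct2 : List Char → List Char
  | a :: b :: r => if pvIsOct a then (if pvIsOct b then r else b :: r) else a :: b :: r
  | [a] => if pvIsOct a then [] else [a]
  | [] => []

theorem pvDropOct2_length_le (cs : List Char) : (pvDropOct2 cs).length ≤ cs.length := by
  match cs with
  | a :: b :: r =>
      simp only [pvDropOct2]
      split_ifs
      all_goals simp
      all_goals omega
  | [a] => simp only [pvDropOct2]; split_ifs <;> simp
  | [] => simp [pvDropOct2]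

-- one regex match = one decoded byte; alternatives in the pattern's order
def pvB_tokens : List Char → Int
  | [] => 0
  | '\\' :: c :: rest =>
      if pvIsSimple c then 1 + pvB_tokens rest
      else if c = 'x' then
        match rest with
        | _ :: _ :: r => 1 + pvB_tokens r
        | r2 => 1 + pvB_tokens (c :: r2)       -- '\x' with <2 chars left: '.' matches the backslash
      else if pvIsOctStart c then 1 + pvB_tokens (pvDropOct2 rest)
      else 1 + pvB_tokens (c :: rest)          -- '.' matches the backslash alone
  | _ :: rest => 1 + pvB_tokens rest
termination_by cs => cs.length
decreasing_by
  all_goals simp_all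
  all_goals first
    | omega
    | (have := pvDropOct2_length_le rest; omega)

def decoded_string_literal_length_alt (content : String) : Int :=
  pvB_tokens content.toList

-- ===== PRECONDITION & SPEC =====
def Spec_decoded_string_literal_length (content : String) (out : Int) : Prop := out = decoded_string_literal_length_alt content
instance (content : String) (out : Int) : Decidable (Spec_decoded_string_literal_length content out) := by unfold Spec_decoded_string_literal_length; infer_instance

-- ===== CLAIM (what is proved, stated in full; the proofs are below) =====
def Claim_equal_decoded_string_literal_length : Prop := ∀ (content : String), Dom_decoded_string_literal_length content → Spec_decoded_string_literal_length content (decoded_string_literal_length content)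

-- ===== LEMMAS AND PROOFS =====

theorem pv_drop_cons (cs : List Char) (i : Nat) (h : i < cs.length) :
    cs.drop i = cs[i]'h :: cs.drop (i + 1) := by
  exact (List.getElem_cons_drop h).symm

-- what A's inner loop computes when started at j = i+2 with p = i+1
theorem pvA_inner_spec (cs : List Char) (i : Nat) :
    pvA_inner cs (i + 1) (i + 2) =
      if h1 : i + 2 < cs.length then
        if pvIsOct (cs[i + 2]'h1) then
          (if h2 : i + 3 < cs.length then
            (if pvIsOct (cs[i + 3]'h2) then i + 4 else i + 3)
          else i + 3)
        else i + 2
      else i + 2 := by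
  by_cases h1 : i + 2 < cs.length
  · rw [pvA_inner, dif_pos h1, dif_pos h1]
    by_cases o1 : pvIsOct (cs[i + 2]'h1)
    · rw [if_pos (show _ ∧ _ from ⟨by omega, by simpa [pvIsOct] using o1⟩), if_pos o1,
          pvA_inner]
      by_cases h2 : i + 3 < cs.length
      · rw [dif_pos (show i + 2 + 1 < cs.length from by omega), dif_pos h2]
        have ogel : pvOctChars.contains (cs[i + 2 + 1]'(by omega)) = pvIsOct (cs[i + 3]'h2) := by
          simp only [pvIsOct, show i + 2 + 1 = i + 3 from by omega]
        by_cases o2 : pvIsOct (cs[i + 3]'h2)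
        · rw [if_pos ⟨by omega, by rw [ogel]; exact o2⟩, if_pos o2, pvA_inner]
          split
          all_goals try rw [if_neg (fun hc => absurd hc.1 (by omega))]
          all_goals omega
        · rw [if_neg (fun hc => o2 (by rw [← ogel]; exact hc.2)), if_neg o2]
          try omega
      · rw [dif_neg (show ¬ i + 2 + 1 < cs.length from by omega), dif_neg h2]
        try omega
    · rw [if_neg (fun hc => o1 (by simpa [pvIsOct] using hc.2)), if_neg o1]
  · rw [pvA_inner, dif_neg h1, dif_neg h1]

theorem pv_drop_inner (cs : List Char) (i : Nat) :
    cs.drop (pvA_inner cs (i + 1) (i + 2)) = pvDropOct2 (cs.drop (i + 2)) := by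
  rw [pvA_inner_spec]
  by_cases h1 : i + 2 < cs.length
  · by_cases h2 : i + 3 < cs.length
    · have hd2 : cs.drop (i + 2) = cs[i+2]'h1 :: cs[i+3]'h2 :: cs.drop (i + 4) := by
        have h2' : i + 2 + 1 < cs.length := by omega
        rw [pv_drop_cons cs (i + 2) h1, pv_drop_cons cs (i + 2 + 1) h2']
      rw [hd2, dif_pos h1]
      simp only [pvDropOct2]
      rw [dif_pos h2]
      split_ifs with o1 o2
      · rfl
      · exact pv_drop_cons cs (i + 3) h2
      · exact hd2
    · have hd3 : cs.drop (i + 3) = [] := List.drop_eq_nil_of_le (by omega)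
      have hd2 : cs.drop (i + 2) = [cs[i+2]'h1] := by
        rw [pv_drop_cons cs (i + 2) h1, List.drop_eq_nil_of_le (show cs.length ≤ i + 2 + 1 from by omega)]
      rw [hd2, dif_pos h1]
      simp only [pvDropOct2]
      rw [dif_neg h2]
      split_ifs with o1
      · exact List.drop_eq_nil_of_le (by omega)
      · exact hd2
  · rw [dif_neg h1, List.drop_eq_nil_of_le (show cs.length ≤ i + 2 from by omega)]
    simp [pvDropOct2]

theorem pvB_tokens_cons (c : Char) (rest : List Char) (hc : c ≠ '\\') :
    pvB_tokens (c :: rest) = 1 + pvB_tokens rest := by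
  rw [pvB_tokens.eq_def]
  split <;> simp_all

theorem pvB_tokens_bs (c : Char) (rest : List Char) :
    pvB_tokens ('\\' :: c :: rest) =
      if pvIsSimple c then 1 + pvB_tokens rest
      else if c = 'x' then
        (match rest with
        | _ :: _ :: r => 1 + pvB_tokens r
        | r2 => 1 + pvB_tokens (c :: r2))
      else if pvIsOctStart c then 1 + pvB_tokens (pvDropOct2 rest)
      else 1 + pvB_tokens (c :: rest) := by
  rw [pvB_tokens.eq_def]
  rfl

theorem pv_loop_eq (cs : List Char) (i : Nat) (acc : Int) :
    pvA_loop cs i acc = acc + pvB_tokens (cs.drop i) := by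
  induction i, acc using pvA_loop.induct cs with
  | case1 i acc h h2 nxt hs ih =>
      -- simple escape
      have hlt : i + 1 < cs.length := h2.2
      simp only [show nxt = cs[i+1]'hlt from rfl] at hs
      have hs' : pvIsSimple (cs[i+1]'hlt) = true := hs
      rw [pvA_loop, dif_pos h, dif_pos h2, if_pos hs, ih,
          pv_drop_cons cs i h, pv_drop_cons cs (i + 1) hlt, h2.1, pvB_tokens_bs,
          if_pos hs', show i + 1 + 1 = i + 2 from by omega]
      ring
  | case2 i acc h h2 nxt hs hx ih =>
      -- \x with two following chars
      have hlt : i + 1 < cs.length := h2.2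
      simp only [show nxt = cs[i+1]'hlt from rfl] at hs hx
      have hs' : ¬ pvIsSimple (cs[i+1]'hlt) = true := hs
      have h3 : i + 2 < cs.length := by omega
      have h4 : i + 3 < cs.length := by omega
      rw [pvA_loop, dif_pos h, dif_pos h2, if_neg hs, if_pos hx, ih,
          pv_drop_cons cs i h, pv_drop_cons cs (i + 1) hlt, h2.1,
          show i + 1 + 1 = i + 2 from by omega, pv_drop_cons cs (i + 2) h3,
          show i + 2 + 1 = i + 3 from by omega, pv_drop_cons cs (i + 3) h4,
          show i + 3 + 1 = i + 4 from by omega, pvB_tokens_bs, if_neg hs', if_pos hx.1]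
      show acc + 1 + pvB_tokens (List.drop (i + 4) cs) =
        acc + (1 + pvB_tokens (List.drop (i + 4) cs))
      ring
  | case3 i acc h h2 nxt hs hx ho ih =>
      -- octal escape
      have hlt : i + 1 < cs.length := h2.2
      simp only [show nxt = cs[i+1]'hlt from rfl] at hs hx ho
      have hs' : ¬ pvIsSimple (cs[i+1]'hlt) = true := hs
      have hstart : pvIsOctStart (cs[i+1]'hlt) = true := by
        have h0 : cs[i+1]'hlt ≠ '0' := by
          intro hcontr
          exact hs (by simp [pvSimpleChars, hcontr])
        revert ho h0
        simp [pvOctChars, pvIsOctStart]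
        tauto
      have hxne : cs[i+1]'hlt ≠ 'x' := by
        intro hcontr; revert ho; simp [pvOctChars, hcontr]
      rw [pvA_loop, dif_pos h, dif_pos h2, if_neg hs, if_neg hx, if_pos ho, ih,
          pv_drop_inner, pv_drop_cons cs i h, pv_drop_cons cs (i + 1) hlt, h2.1,
          show i + 1 + 1 = i + 2 from by omega, pvB_tokens_bs, if_neg hs', if_neg hxne,
          if_pos hstart]
      ring
  | case4 i acc h h2 nxt hs hx ho ih =>
      -- backslash but no escape matched: count the backslash alone
      have hlt : i + 1 < cs.length := h2.2
      simp only [show nxt = cs[i+1]'hlt from rfl] at hs hx ho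
      have hs' : ¬ pvIsSimple (cs[i+1]'hlt) = true := hs
      rw [pvA_loop, dif_pos h, dif_pos h2, if_neg hs, if_neg hx, if_neg ho, ih,
          pv_drop_cons cs i h, pv_drop_cons cs (i + 1) hlt, h2.1,
          show i + 1 + 1 = i + 2 from by omega, pvB_tokens_bs, if_neg hs']
      by_cases hxc : cs[i+1]'hlt = 'x'
      · rw [if_pos hxc, hxc]
        have hlen : ¬ i + 3 < cs.length := fun hl => hx ⟨hxc, hl⟩
        have hshape : cs.drop (i + 2) = [] ∨ ∃ a, cs.drop (i + 2) = [a] := by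
          by_cases h3 : i + 2 < cs.length
          · exact Or.inr ⟨cs[i+2]'h3, by
              rw [pv_drop_cons cs (i + 2) h3, List.drop_eq_nil_of_le (by omega)]⟩
          · exact Or.inl (List.drop_eq_nil_of_le (by omega))
        rcases hshape with hd | ⟨a, hd⟩
        · rw [hd]
          show acc + 1 + pvB_tokens ['x'] = acc + (1 + pvB_tokens ['x'])
          ring
        · rw [hd]
          show acc + 1 + pvB_tokens ['x', a] = acc + (1 + pvB_tokens ['x', a])
          ring
      · have hos : pvIsOctStart (cs[i+1]'hlt) = false := by
          revert ho; simp [pvOctChars, pvIsOctStart]; try tauto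
        rw [if_neg hxc, if_neg (show ¬ pvIsOctStart (cs[i+1]'hlt) = true from by simp [hos])]
        ring
  | case5 i acc h h2 ih =>
      -- ordinary character (or backslash at the very end)
      rw [pvA_loop, dif_pos h, dif_neg h2, ih, pv_drop_cons cs i h]
      by_cases hb : cs[i]'h = '\\'
      · have hlen : ¬ i + 1 < cs.length := fun hl => h2 ⟨hb, hl⟩
        rw [List.drop_eq_nil_of_le (show cs.length ≤ i + 1 from by omega), hb]
        have t0 : pvB_tokens ([] : List Char) = 0 := by rw [pvB_tokens.eq_def]
        have t1 : pvB_tokens ['\\'] = 1 + pvB_tokens [] := by rw [pvB_tokens.eq_def]; try rfl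
        rw [t1, t0]
        ring
      · rw [pvB_tokens_cons _ _ hb]; ring
  | case6 i acc h =>
      rw [pvA_loop, dif_neg h, List.drop_eq_nil_of_le (show cs.length ≤ i from by omega)]
      simp [pvB_tokens]

-- ===== VERDICT (by name: the statement is the Claim_ definition above) =====
theorem decoded_string_literal_length_spec : Claim_equal_decoded_string_literal_length := by
  intro content _
  unfold Spec_decoded_string_literal_length decoded_string_literal_length decoded_string_literal_length_alt
  rw [pv_loop_eq]; simp
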